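-- pv_equiv track=rewrite | github.com/thoughtspot/thoughtspot_rest_api_v1_python | examples_v2/set_obj_id.py | find_duplicate_obj_ids
-- ===== SOURCE A (Python) =====
-- from typing import Optional, Dict, List
-- from collections import Counter
--
-- def find_duplicate_obj_ids(initial_map: Dict) -> Dict:
--     cnt = Counter(initial_map.values())
--
--     if len(initial_map) == len(cnt):
--         return {}
--     else:
--         duplicate_obj_ids = []
--         for c in cnt:
--             if cnt[c] > 1:
--                 duplicate_obj_ids.append(c)
--         dup_map = {}
--
--         for m in initial_map:
--             if initial_map[m] in duplicate_obj_ids: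
--                 dup_map[m] = initial_map[m]
--         return dup_map
-- ===== SOURCE B (Python) =====
-- def find_duplicate_obj_ids(initial_map):
--     vals = sorted(initial_map.values())
--     dups = {a for a, b in zip(vals, vals[1:]) if a == b}
--     return {k: v for k, v in initial_map.items() if v in dups}
-- ===== Notes on version B (the rewrite author's own statement) =====
-- stated objective: alternative
-- what changed: B sorts the values and reads the duplicated values off adjacent equal pairs in the sorted list (sort-then-scan), then keeps the items with such a value, replacing A's Counter, early len-equality guard, explicit duplicate-value list and per-item list-membership rescan.
import Mathlib
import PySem

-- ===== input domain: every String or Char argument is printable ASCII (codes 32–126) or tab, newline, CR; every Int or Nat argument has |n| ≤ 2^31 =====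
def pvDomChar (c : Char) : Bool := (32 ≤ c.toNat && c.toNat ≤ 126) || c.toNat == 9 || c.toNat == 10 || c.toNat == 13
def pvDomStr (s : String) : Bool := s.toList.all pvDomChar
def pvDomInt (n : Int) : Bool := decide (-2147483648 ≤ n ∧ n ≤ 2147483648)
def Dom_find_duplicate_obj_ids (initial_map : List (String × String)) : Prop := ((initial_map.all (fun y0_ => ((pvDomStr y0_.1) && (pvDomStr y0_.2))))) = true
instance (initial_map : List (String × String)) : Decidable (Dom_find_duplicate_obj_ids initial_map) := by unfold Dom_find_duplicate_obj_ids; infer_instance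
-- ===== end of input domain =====

-- B replaces A's Counter + duplicate-value list + membership rescan by sort-then-scan:
-- sort the values, collect the values that equal their successor (exactly the duplicated
-- ones, since a sorted list keeps equal values adjacent), then keep the items with such
-- a value (objective: alternative).

-- ===== PORT A =====
-- literal port of A: Counter over the values, the len(initial_map)==len(cnt) early
-- return, the duplicate-value list built from the Counter, then the rescan of
-- initial_map.  `initial_map[m]` is ported as `(Dict.mk initial_map).getD m ""`:
-- exact because m is drawn from the dict's own keys, so the default is never used.
def find_duplicate_obj_ids (initial_map : List (String × String)) : List (String × String) :=
  let cnt := PySem.Dict.counter (initial_map.map Prod.snd)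
  if initial_map.length == cnt.size then []
  else
    let duplicate_obj_ids : List String :=
      cnt.keys.foldl (fun acc c => if 1 < cnt.getD c 0 then acc ++ [c] else acc) []
    let dup_map : PySem.Dict String String :=
      (initial_map.map Prod.fst).foldl
        (fun dm m =>
          if duplicate_obj_ids.contains ((PySem.Dict.mk initial_map).getD m "") then
            dm.insert m ((PySem.Dict.mk initial_map).getD m "")
          else dm)
        PySem.Dict.empty
    dup_map.items

-- ===== PORT B =====
-- port of Source B: vals = sorted(values); the set comprehension over zip(vals, vals[1:])
-- is a fold adding a when a == b; then the dict comprehension keeping items whose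
-- value is in that set.
def find_duplicate_obj_ids_alt (initial_map : List (String × String)) : List (String × String) :=
  let vals := PySem.List.sorted (initial_map.map Prod.snd) (fun x => x) false
  let dups : PySem.Set String :=
    (vals.zip (PySem.List.slice vals (some 1) none)).foldl
      (fun s p => if p.1 == p.2 then PySem.Set.add s p.1 else s) PySem.Set.empty
  (initial_map.foldl
      (fun dm kv => if PySem.Set.contains dups kv.2 then dm.insert kv.1 kv.2 else dm)
      PySem.Dict.empty).items

-- ===== PRECONDITION & SPEC =====
-- Pre_ excludes only association lists with a repeated key: A's parameter is a Python
-- dict, whose keys are necessarily distinct, so such lists represent no input of A.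
def Pre_find_duplicate_obj_ids (initial_map : List (String × String)) : Prop :=
  (initial_map.map Prod.fst).Nodup
instance (initial_map : List (String × String)) : Decidable (Pre_find_duplicate_obj_ids initial_map) := by unfold Pre_find_duplicate_obj_ids; infer_instance
def pvWitness_find_duplicate_obj_ids : (List (String × String)) :=
  [("a", "x"), ("b", "x"), ("c", "y")]
def Spec_find_duplicate_obj_ids (initial_map : List (String × String)) (out : List (String × String)) : Prop := out = find_duplicate_obj_ids_alt initial_map
instance (initial_map : List (String × String)) (out : List (String × String)) : Decidable (Spec_find_duplicate_obj_ids initial_map out) := by unfold Spec_find_duplicate_obj_ids; infer_instance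

-- ===== CLAIM (what is proved, stated in full; the proofs are below) =====
def Claim_equal_find_duplicate_obj_ids : Prop := ∀ (initial_map : List (String × String)), Dom_find_duplicate_obj_ids initial_map → Pre_find_duplicate_obj_ids initial_map → Spec_find_duplicate_obj_ids initial_map (find_duplicate_obj_ids initial_map)

-- ===== LEMMAS AND PROOFS =====

-- set(xs) (first occurrences) is a sublist of xs
theorem pv_ofList_sublist {α : Type} [BEq α] [LawfulBEq α] (xs : List α) :
    (PySem.Set.ofList xs).Sublist xs := by
  induction xs with
  | nil => simp [PySem.Set.ofList, PySem.Set.empty]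
  | cons x t ih =>
      rw [PySem.Set.ofList_cons]
      exact List.Sublist.cons₂ x (List.filter_sublist.trans ih)

theorem pv_nodup_of_ofList_length {α : Type} [BEq α] [LawfulBEq α] (xs : List α)
    (h : (PySem.Set.ofList xs).length = xs.length) : xs.Nodup := by
  have := (pv_ofList_sublist xs).eq_of_length h
  rw [← this]; exact PySem.Set.nodup_ofList (xs := xs)

-- membership in A's duplicate-value list is exactly "this value occurs more than once"
theorem pv_mem_dup_list (vs : List String) (v : String) :
    v ∈ ((PySem.Dict.counter vs).keys.foldl
        (fun acc c => if 1 < (PySem.Dict.counter vs).getD c 0 then acc ++ [c] else acc) [])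
      ↔ 1 < vs.count v := by
  rw [PySem.List.foldl_append_ite_eq_filter]
  simp only [List.nil_append, List.mem_filter, PySem.Dict.keys_counter,
    PySem.Dict.getD_counter, PySem.Set.mem_ofList, decide_eq_true_eq]
  constructor
  · rintro ⟨-, h⟩; exact_mod_cast h
  · intro h
    refine ⟨List.count_pos_iff.mp ?_, by exact_mod_cast h⟩
    omega

-- B's set-comprehension fold: v is in the set iff the adjacent pair (v, v) occurs
theorem pv_mem_fold_add (ps : List (String × String)) (s0 : PySem.Set String) (v : String) :
    v ∈ ps.foldl (fun s p => if p.1 == p.2 then PySem.Set.add s p.1 else s) s0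
      ↔ v ∈ s0 ∨ (v, v) ∈ ps := by
  induction ps generalizing s0 with
  | nil => simp
  | cons p t ih =>
      obtain ⟨a, b⟩ := p
      rw [List.foldl_cons]
      by_cases h : a = b
      · subst h
        rw [if_pos (by simp), ih]
        simp only [PySem.Set.mem_add, List.mem_cons, Prod.mk.injEq]
        tauto
      · rw [if_neg (by simpa using h), ih]
        simp only [List.mem_cons, Prod.mk.injEq]
        constructor
        · rintro (hs | ht)
          · exact Or.inl hs
          · exact Or.inr (Or.inr ht)
        · rintro (hs | ⟨h1, h2⟩ | ht)
          · exact Or.inl hs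
          · exact absurd (h1.symm.trans h2) h
          · exact Or.inr ht

-- an adjacent equal pair yields two occurrences (any list)
theorem pv_count_of_mem_zip_tail (l : List String) (v : String)
    (h : (v, v) ∈ l.zip l.tail) : 2 ≤ l.count v := by
  induction l with
  | nil => simp at h
  | cons x t ih =>
      cases t with
      | nil => simp at h
      | cons y t' =>
          rw [List.tail_cons, List.zip_cons_cons, List.mem_cons] at h
          rcases h with hp | ht
          · obtain ⟨h1, h2⟩ := Prod.mk.injEq .. ▸ hp
            subst h1; subst h2
            rw [List.count_cons_self, List.count_cons_self]
            omega
          · have := ih (by rw [List.tail_cons]; exact ht)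
            rw [List.count_cons]; omega

-- in a sorted list, two occurrences sit adjacently
theorem pv_mem_zip_tail_of_count (l : List String) (v : String)
    (hs : l.Pairwise (· ≤ ·)) (h : 2 ≤ l.count v) : (v, v) ∈ l.zip l.tail := by
  induction l with
  | nil => simp at h
  | cons x t ih =>
      rcases List.pairwise_cons.mp hs with ⟨hx, ht⟩
      by_cases hxv : x = v
      · -- v is the head; the second copy is in t, and t's head must be v
        subst hxv
        have hvt : x ∈ t := by
          rw [List.count_cons_self] at h
          exact List.count_pos_iff.mp (by omega)
        cases t with
        | nil => simp at hvt
        | cons y t' =>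
            have hy : y = x := by
              rcases List.mem_cons.mp hvt with hv | hv'
              · exact hv.symm
              · have h1 : x ≤ y := hx y (by simp)
                have h2 : y ≤ x := (List.pairwise_cons.mp ht).1 x hv'
                exact le_antisymm h2 h1
            subst hy
            rw [List.tail_cons, List.zip_cons_cons]
            exact List.mem_cons.mpr (Or.inl rfl)
      · have h2 : 2 ≤ t.count v := by
          rw [List.count_cons] at h
          simpa [hxv] using h
        have hmem := ih ht h2
        cases t with
        | nil => simp at h2
        | cons y t' =>
            rw [List.tail_cons, List.zip_cons_cons]
            rw [List.tail_cons] at hmem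
            exact List.mem_cons.mpr (Or.inr hmem)

-- B's set holds exactly the values occurring more than once
theorem pv_mem_dups_iff (vs : List String) (v : String) :
    v ∈ ((PySem.List.sorted vs (fun x => x) false).zip
          (PySem.List.slice (PySem.List.sorted vs (fun x => x) false) (some 1) none)).foldl
        (fun s p => if p.1 == p.2 then PySem.Set.add s p.1 else s) PySem.Set.empty
      ↔ 1 < vs.count v := by
  rw [PySem.List.slice_from_one, pv_mem_fold_add]
  have hcnt : (PySem.List.sorted vs (fun x => x) false).count v = vs.count v :=
    (PySem.List.sorted_perm (xs := vs) (key := fun x => x) (rev := false)).count_eq v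
  have hsorted : (PySem.List.sorted vs (fun x => x) false).Pairwise (· ≤ ·) :=
    PySem.List.sorted_pairwise (xs := vs) (key := fun x => x)
  constructor
  · rintro (hs | hz)
    · simp [PySem.Set.empty] at hs
    · have := pv_count_of_mem_zip_tail _ v hz
      omega
  · intro h
    exact Or.inr (pv_mem_zip_tail_of_count _ v hsorted (by omega))

theorem pv_foldl_id {α β : Type} (l : List α) (init : β) :
    l.foldl (fun acc _ => acc) init = init := by
  induction l generalizing init with
  | nil => rfl
  | cons x t ih => exact ih init

-- ===== VERDICT (by name: the statement is the Claim_ definition above) =====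
theorem find_duplicate_obj_ids_spec : Claim_equal_find_duplicate_obj_ids := by
  intro im _dom hpre
  unfold Spec_find_duplicate_obj_ids find_duplicate_obj_ids find_duplicate_obj_ids_alt
  have hkeys : ((PySem.Dict.mk im).items.map Prod.fst).Nodup := hpre
  have hBcond : ∀ c : String,
      (PySem.Set.contains ((( PySem.List.sorted (im.map Prod.snd) (fun x => x) false).zip
          (PySem.List.slice (PySem.List.sorted (im.map Prod.snd) (fun x => x) false) (some 1) none)).foldl
        (fun s p => if p.1 == p.2 then PySem.Set.add s p.1 else s) PySem.Set.empty) c) = true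
        ↔ 1 < (im.map Prod.snd).count c := by
    intro c
    rw [PySem.Set.contains_iff, pv_mem_dups_iff]
  by_cases hg : im.length = (PySem.Dict.counter (im.map Prod.snd)).size
  · -- all values distinct: both sides are the empty dict
    simp only [hg, beq_self_eq_true, if_true]
    have hlen : (PySem.Set.ofList (im.map Prod.snd)).length = (im.map Prod.snd).length := by
      have h1 : (PySem.Dict.counter (im.map Prod.snd)).size
          = (PySem.Set.ofList (im.map Prod.snd)).length := by
        simp [PySem.Dict.size, PySem.Dict.items_counter]
      have h2 : (im.map Prod.snd).length = im.length := by simp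
      omega
    have hnd : (im.map Prod.snd).Nodup := pv_nodup_of_ofList_length _ hlen
    have : im.foldl
        (fun dm kv => if PySem.Set.contains ((( PySem.List.sorted (im.map Prod.snd) (fun x => x) false).zip
          (PySem.List.slice (PySem.List.sorted (im.map Prod.snd) (fun x => x) false) (some 1) none)).foldl
        (fun s p => if p.1 == p.2 then PySem.Set.add s p.1 else s) PySem.Set.empty) kv.2 then dm.insert kv.1 kv.2 else dm)
        PySem.Dict.empty = PySem.Dict.empty := by
      rw [PySem.List.foldl_congr_mem _ _ (fun acc _ => acc) _ ?_, pv_foldl_id]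
      intro acc kv hkv
      have hle : (im.map Prod.snd).count kv.2 ≤ 1 :=
        List.nodup_iff_count_le_one.mp hnd kv.2
      have hnc : ¬ (PySem.Set.contains ((( PySem.List.sorted (im.map Prod.snd) (fun x => x) false).zip
          (PySem.List.slice (PySem.List.sorted (im.map Prod.snd) (fun x => x) false) (some 1) none)).foldl
        (fun s p => if p.1 == p.2 then PySem.Set.add s p.1 else s) PySem.Set.empty) kv.2) = true := by
        rw [hBcond kv.2]; omega
      exact if_neg hnc
    rw [this]
    rfl
  · have hgb : (im.length == (PySem.Dict.counter (im.map Prod.snd)).size) = false := by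
      simpa using hg
    simp only [hgb, Bool.false_eq_true, if_false]
    rw [List.foldl_map]
    apply congrArg PySem.Dict.items
    apply PySem.List.foldl_congr_mem
    intro acc kv hkv
    have hitem : (kv.1, kv.2) ∈ (PySem.Dict.mk im).items := by simpa using hkv
    have hv : (PySem.Dict.mk im).getD kv.1 "" = kv.2 :=
      PySem.Dict.getD_of_mem_items _ hitem hkeys ""
    rw [hv]
    have hAcond :
        (((PySem.Dict.counter (im.map Prod.snd)).keys.foldl
            (fun acc c => if 1 < (PySem.Dict.counter (im.map Prod.snd)).getD c 0 then acc ++ [c] else acc) []).contains kv.2)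
          = true ↔ 1 < (im.map Prod.snd).count kv.2 := by
      rw [List.contains_iff_mem]
      exact pv_mem_dup_list _ _
    by_cases hc : 1 < (im.map Prod.snd).count kv.2
    · rw [if_pos (hAcond.mpr hc), if_pos ((hBcond kv.2).mpr hc)]
    · rw [if_neg (fun h => hc (hAcond.mp h)), if_neg (fun h => hc ((hBcond kv.2).mp h))]
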